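-- pv_equiv track=rewrite | github.com/Tilapiatsu/blender-custom_config | scripts/addon_library/local/kekit/_utils.py | vertloops
-- ===== SOURCE A (Python) =====
-- def vertloops(vertpairs):
--     """Sort verts from list of vert pairs"""
--     loop_vp = [i for i in vertpairs]
--     loops = []
--     while len(loop_vp) > 0:
--         vpsort = [loop_vp[0][0], loop_vp[0][1]]
--         loop_vp.pop(0)
--         loops.append(vpsort)
--         for n in range(0, len(vertpairs)):
--             i = 0
--             for e in loop_vp:
--                 if vpsort[0] == e[0]:
--                     vpsort.insert(0, e[1])
--                     loop_vp.pop(i)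
--                     break
--                 elif vpsort[0] == e[1]:
--                     vpsort.insert(0, e[0])
--                     loop_vp.pop(i)
--                     break
--                 elif vpsort[-1] == e[0]:
--                     vpsort.append(e[1])
--                     loop_vp.pop(i)
--                     break
--                 elif vpsort[-1] == e[1]:
--                     vpsort.append(e[0])
--                     loop_vp.pop(i)
--                     break
--                 else:
--                     i = i + 1
--     return loops
-- ===== SOURCE B (Python) =====
-- def vertloops(vertpairs):
--     """Sort verts from list of vert pairs"""
--     m = len(vertpairs)
--     # adjacency: vertex -> ascending list of indices of incident edges
--     inc = {}
--     for k in range(m):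
--         e = vertpairs[k]
--         for v in (e[0], e[1]):
--             inc.setdefault(v, []).append(k)
--     used = [False] * m
--
--     def first_unused(v):
--         for k in inc.get(v, ()):
--             if not used[k]:
--                 return k
--         return None
--
--     loops = []
--     for seed in range(m):
--         if used[seed]:
--             continue
--         e = vertpairs[seed]
--         used[seed] = True
--         front, back = [e[0]], [e[1]]   # chain = front[::-1] + back
--         while True:
--             h, t = front[-1], back[-1]
--             kh, kt = first_unused(h), first_unused(t)
--             if kh is None and kt is None:
--                 break
--             if kt is None or (kh is not None and kh <= kt):
--                 k = kh
--             else: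
--                 k = kt
--             e = vertpairs[k]
--             used[k] = True
--             if h == e[0]:
--                 front.append(e[1])
--             elif h == e[1]:
--                 front.append(e[0])
--             elif t == e[0]:
--                 back.append(e[1])
--             else:
--                 back.append(e[0])
--         loops.append(front[::-1] + back)
--     return loops
-- ===== Notes on version B (the rewrite author's own statement) =====
-- stated objective: faster
-- what changed: B builds a vertex->incident-edge-index adjacency dict once and a used-flag array, then grows each chain by looking up the earliest unused edge incident to the chain's head or tail, instead of A's repeated linear rescans (with pop/insert) of the shrinking edge list inside a fixed len(vertpairs)-pass outer loop.
import Mathlib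
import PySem

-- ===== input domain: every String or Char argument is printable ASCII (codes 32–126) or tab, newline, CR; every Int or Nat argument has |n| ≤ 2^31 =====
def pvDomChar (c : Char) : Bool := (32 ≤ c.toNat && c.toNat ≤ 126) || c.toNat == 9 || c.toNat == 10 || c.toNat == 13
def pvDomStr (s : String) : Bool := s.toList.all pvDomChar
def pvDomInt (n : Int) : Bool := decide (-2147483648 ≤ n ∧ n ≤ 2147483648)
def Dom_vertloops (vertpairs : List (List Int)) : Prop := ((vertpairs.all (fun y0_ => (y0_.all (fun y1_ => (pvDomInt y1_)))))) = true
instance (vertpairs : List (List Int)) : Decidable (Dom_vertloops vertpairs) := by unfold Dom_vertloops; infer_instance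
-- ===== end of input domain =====

-- B replaces A's repeated rescans of the shrinking edge list by a vertex→incident-edge-index
-- adjacency dict built once plus a used-flag array: each chain is grown by picking the earliest
-- unused edge incident to its head or tail; measurably faster on the timed inputs.

-- ===== PORT A =====
-- inner 'for e in loop_vp' with counter i, pop(i) and break: returns the grown vpsort and the
-- remaining edge list, or none when no edge matched (then i ran off the end, nothing popped)
def scanA (vpsort : List Int) : List (List Int) → Option (List Int × List (List Int))
  | [] => none
  | e :: rest =>
    if PySem.List.pyGetD vpsort 0 0 == PySem.List.pyGetD e 0 0 then
      some (PySem.List.pyGetD e 1 0 :: vpsort, rest)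
    else if PySem.List.pyGetD vpsort 0 0 == PySem.List.pyGetD e 1 0 then
      some (PySem.List.pyGetD e 0 0 :: vpsort, rest)
    else if PySem.List.pyGetD vpsort (-1) 0 == PySem.List.pyGetD e 0 0 then
      some (vpsort ++ [PySem.List.pyGetD e 1 0], rest)
    else if PySem.List.pyGetD vpsort (-1) 0 == PySem.List.pyGetD e 1 0 then
      some (vpsort ++ [PySem.List.pyGetD e 0 0], rest)
    else
      match scanA vpsort rest with
      | none => none
      | some (v, r) => some (v, e :: r)

-- body of one iteration of 'for n in range(0, len(vertpairs))'
def stepA (s : List Int × List (List Int)) : List Int × List (List Int) :=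
  match scanA s.1 s.2 with
  | none => s
  | some s' => s'

-- 'while len(loop_vp) > 0'; fuel = len(vertpairs) bounds the iterations (each pops one edge);
-- m is the fixed len(vertpairs) of the inner for-range
def loopA (m : Nat) : Nat → List (List Int) → List (List Int)
  | _, [] => []
  | 0, _ :: _ => []
  | fuel + 1, e :: rest =>
    let s := (PySem.List.pyRange 0 (m : Int) 1).foldl (fun s _ => stepA s)
      ([PySem.List.pyGetD e 0 0, PySem.List.pyGetD e 1 0], rest)
    s.1 :: loopA m fuel s.2

def vertloops (vertpairs : List (List Int)) : List (List Int) :=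
  loopA vertpairs.length vertpairs.length vertpairs

-- ===== PORT B =====
-- 'inc.setdefault(v, []).append(k)' for v in (e[0], e[1]), k over range(m)
def buildInc (vertpairs : List (List Int)) : PySem.Dict Int (List Int) :=
  (PySem.List.pyRange 0 (vertpairs.length : Int) 1).foldl (fun d k =>
    let e := PySem.List.pyGetD vertpairs k []
    [PySem.List.pyGetD e 0 0, PySem.List.pyGetD e 1 0].foldl
      (fun d v => d.modify v [] (· ++ [k])) d) PySem.Dict.empty

-- 'for k in inc.get(v, ()): if not used[k]: return k' / 'return None'
def firstUnusedIn (used : List Bool) : List Int → Option Int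
  | [] => none
  | k :: ks => if PySem.List.pyGetD used k false then firstUnusedIn used ks else some k

def firstUnused (inc : PySem.Dict Int (List Int)) (used : List Bool) (v : Int) : Option Int :=
  firstUnusedIn used (inc.getD v [])

-- the 'kh, kt = …; if …: break; k = …' selection block
def selectK (inc : PySem.Dict Int (List Int)) (used : List Bool) (h t : Int) : Option Int :=
  match firstUnused inc used h, firstUnused inc used t with
  | none, none => none
  | some kh, none => some kh
  | none, some kt => some kt
  | some kh, some kt => some (if kh ≤ kt then kh else kt)

-- 'while True: …' of B; fuel = len(vertpairs) bounds the iterations (each marks one edge used);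
-- front/back are python's stacks stored top-first, so python's front[-1]/back[-1] are the heads
-- and the chain is front-reversed ++ back
def growB (vp : List (List Int)) (inc : PySem.Dict Int (List Int)) :
    Nat → List Int → List Int → List Bool → List Int × List Int × List Bool
  | 0, front, back, used => (front, back, used)
  | fuel + 1, front, back, used =>
    match selectK inc used (front.headD 0) (back.headD 0) with
    | none => (front, back, used)
    | some k =>
      let e := PySem.List.pyGetD vp k []
      let used' := used.set k.toNat true
      if front.headD 0 == PySem.List.pyGetD e 0 0 then
        growB vp inc fuel (PySem.List.pyGetD e 1 0 :: front) back used'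
      else if front.headD 0 == PySem.List.pyGetD e 1 0 then
        growB vp inc fuel (PySem.List.pyGetD e 0 0 :: front) back used'
      else if back.headD 0 == PySem.List.pyGetD e 0 0 then
        growB vp inc fuel front (PySem.List.pyGetD e 1 0 :: back) used'
      else
        growB vp inc fuel front (PySem.List.pyGetD e 0 0 :: back) used'

-- 'for seed in range(m): if used[seed]: continue; …'
def seedLoopB (vp : List (List Int)) (inc : PySem.Dict Int (List Int)) :
    List Int → List Bool → List (List Int)
  | [], _ => []
  | k :: ks, used =>
    if PySem.List.pyGetD used k false then seedLoopB vp inc ks used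
    else
      let e := PySem.List.pyGetD vp k []
      let s := growB vp inc vp.length [PySem.List.pyGetD e 0 0] [PySem.List.pyGetD e 1 0]
        (used.set k.toNat true)
      (s.1 ++ s.2.1.reverse) :: seedLoopB vp inc ks s.2.2

def vertloops_alt (vertpairs : List (List Int)) : List (List Int) :=
  seedLoopB vertpairs (buildInc vertpairs) (PySem.List.pyRange 0 (vertpairs.length : Int) 1)
    (List.replicate vertpairs.length false)

-- ===== PRECONDITION & SPEC =====
-- A raises IndexError as soon as a pair with fewer than 2 entries is seeded or scanned, which
-- happens for every such pair before the function returns; Pre_ excludes exactly those inputs.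
def Pre_vertloops (vertpairs : List (List Int)) : Prop :=
  ∀ p ∈ vertpairs, 2 ≤ p.length
instance (vertpairs : List (List Int)) : Decidable (Pre_vertloops vertpairs) := by
  unfold Pre_vertloops; infer_instance

def pvWitness_vertloops : List (List Int) := [[1, 2], [5, 6], [3, 2]]

def Spec_vertloops (vertpairs : List (List Int)) (out : List (List Int)) : Prop :=
  out = vertloops_alt vertpairs
instance (vertpairs : List (List Int)) (out : List (List Int)) : Decidable (Spec_vertloops vertpairs out) := by
  unfold Spec_vertloops; infer_instance

-- ===== CLAIM (what is proved, stated in full; the proofs are below) =====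
def Claim_equal_vertloops : Prop := ∀ (vertpairs : List (List Int)), Dom_vertloops vertpairs → Pre_vertloops vertpairs → Spec_vertloops vertpairs (vertloops vertpairs)

-- ===== LEMMAS AND PROOFS =====

-- ---- proof-side intermediate: A's computation as an extend-until-failure loop on edge lists ----

def findEdge (h t : Int) : List (List Int) → Option ((Bool × Int) × List (List Int))
  | [] => none
  | e :: rest =>
    if h == PySem.List.pyGetD e 0 0 then some ((true, PySem.List.pyGetD e 1 0), rest)
    else if h == PySem.List.pyGetD e 1 0 then some ((true, PySem.List.pyGetD e 0 0), rest)
    else if t == PySem.List.pyGetD e 0 0 then some ((false, PySem.List.pyGetD e 1 0), rest)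
    else if t == PySem.List.pyGetD e 1 0 then some ((false, PySem.List.pyGetD e 0 0), rest)
    else
      match findEdge h t rest with
      | none => none
      | some (p, r) => some (p, e :: r)

def grow : Nat → List Int → List Int → List (List Int) →
    List Int × List Int × List (List Int)
  | 0, front, back, edges => (front, back, edges)
  | fuel + 1, front, back, edges =>
    match findEdge (front.headD 0) (back.headD 0) edges with
    | none => (front, back, edges)
    | some ((side, v), rest) =>
      if side then grow fuel (v :: front) back rest else grow fuel front (v :: back) rest

def altLoop : Nat → List (List Int) → List (List Int)
  | _, [] => []
  | 0, _ :: _ => []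
  | fuel + 1, e :: rest =>
    let s := grow (rest.length + 1) [PySem.List.pyGetD e 0 0] [PySem.List.pyGetD e 1 0] rest
    (s.1 ++ s.2.1.reverse) :: altLoop fuel s.2.2

theorem findEdge_some_length (h t : Int) (edges : List (List Int))
    (p : Bool × Int) (r : List (List Int)) (he : findEdge h t edges = some (p, r)) :
    r.length + 1 = edges.length := by
  induction edges generalizing p r with
  | nil => simp [findEdge] at he
  | cons e rest ih =>
    unfold findEdge at he
    split_ifs at he <;> try (cases he; simp)
    revert he
    cases hs : findEdge h t rest with
    | none => intro he; cases he
    | some s =>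
      intro he
      cases he
      simp [← ih s.1 s.2 hs]

theorem grow_rem_le (fuel : Nat) : ∀ (front back : List Int) (edges : List (List Int)),
    (grow fuel front back edges).2.2.length ≤ edges.length := by
  induction fuel with
  | zero => intro f b e; simp [grow]
  | succ fuel ih =>
    intro f b e
    unfold grow
    split
    · simp
    · rename_i side v rest heq
      have := findEdge_some_length _ _ e (side, v) rest heq
      split_ifs
      · exact le_trans (ih _ _ _) (by omega)
      · exact le_trans (ih _ _ _) (by omega)

-- A's inner scan, on a chain split as front ++ back.reverse (both stacks nonempty), finds exactly
-- the edge findEdge finds and extends the matching end the same way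
theorem scanA_eq_findEdge (f0 b0 : Int) (fr br : List Int) (edges : List (List Int)) :
    scanA ((f0 :: fr) ++ (b0 :: br).reverse) edges =
      (findEdge f0 b0 edges).map (fun p =>
        (if p.1.1 then (p.1.2 :: f0 :: fr) ++ (b0 :: br).reverse
         else (f0 :: fr) ++ (p.1.2 :: b0 :: br).reverse, p.2)) := by
  have h0 : PySem.List.pyGetD ((f0 :: fr) ++ (b0 :: br).reverse) 0 0 = f0 := by
    simp [List.cons_append, PySem.List.pyGetD_zero_cons]
  have h1 : PySem.List.pyGetD ((f0 :: fr) ++ (b0 :: br).reverse) (-1) 0 = b0 := by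
    rw [show (f0 :: fr) ++ (b0 :: br).reverse = ((f0 :: fr) ++ br.reverse) ++ [b0] by simp]
    exact PySem.List.pyGetD_neg_one_append_singleton _ _ _
  induction edges with
  | nil => simp [scanA, findEdge]
  | cons e rest ih =>
    unfold scanA findEdge
    rw [h0, h1]
    split_ifs
    · simp
    · simp
    · simp
    · simp
    · rw [ih]
      cases findEdge f0 b0 rest <;> simp

-- m passes of A's no-op-padded pass equal the extend-until-failure loop, provided m and the fuel
-- are at least the number of remaining edges (each successful pass consumes one edge)
theorem iterate_stepA_eq_grow (m : Nat) : ∀ (fuel : Nat) (f0 b0 : Int) (fr br : List Int)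
    (edges : List (List Int)), edges.length ≤ m → edges.length ≤ fuel →
    stepA^[m] ((f0 :: fr) ++ (b0 :: br).reverse, edges) =
      ((grow fuel (f0 :: fr) (b0 :: br) edges).1 ++
        (grow fuel (f0 :: fr) (b0 :: br) edges).2.1.reverse,
       (grow fuel (f0 :: fr) (b0 :: br) edges).2.2) := by
  induction m with
  | zero =>
    intro fuel f0 b0 fr br edges hm _
    have he : edges = [] := List.length_eq_zero_iff.mp (Nat.le_zero.mp hm)
    subst he
    cases fuel <;> simp [grow, findEdge]
  | succ m ih =>
    intro fuel f0 b0 fr br edges hm hf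
    cases hfe : findEdge f0 b0 edges with
    | none =>
      have hscan : scanA ((f0 :: fr) ++ (b0 :: br).reverse) edges = none := by
        rw [scanA_eq_findEdge, hfe]; rfl
      have hfix : stepA ((f0 :: fr) ++ (b0 :: br).reverse, edges)
          = ((f0 :: fr) ++ (b0 :: br).reverse, edges) := by
        unfold stepA; rw [hscan]
      have hgrow : grow fuel (f0 :: fr) (b0 :: br) edges = ((f0 :: fr), (b0 :: br), edges) := by
        cases fuel with
        | zero => rfl
        | succ fuel => simp only [grow, List.headD_cons, hfe]
      rw [Function.iterate_fixed hfix, hgrow]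
    | some pr =>
      obtain ⟨⟨side, v⟩, rest⟩ := pr
      have hlen := findEdge_some_length _ _ edges (side, v) rest hfe
      have hfuel : fuel ≠ 0 := by omega
      obtain ⟨fuel, rfl⟩ := Nat.exists_eq_succ_of_ne_zero hfuel
      have hstep : stepA ((f0 :: fr) ++ (b0 :: br).reverse, edges)
          = (if side then (v :: f0 :: fr) ++ (b0 :: br).reverse
             else (f0 :: fr) ++ ((v :: b0 :: br)).reverse, rest) := by
        unfold stepA
        rw [scanA_eq_findEdge, hfe]
        cases side <;> simp
      have hgrow : grow (fuel + 1) (f0 :: fr) (b0 :: br) edges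
          = if side then grow fuel (v :: f0 :: fr) (b0 :: br) rest
            else grow fuel (f0 :: fr) (v :: b0 :: br) rest := by
        simp only [grow, List.headD_cons, hfe]
      rw [Function.iterate_succ_apply, hstep, hgrow]
      cases side
      · simpa using ih fuel f0 v fr (b0 :: br) rest (by omega) (by omega)
      · simpa using ih fuel v b0 (f0 :: fr) br rest (by omega) (by omega)

theorem length_pyRange_zero (m : Nat) : (PySem.List.pyRange 0 (m : Int) 1).length = m := by
  simp [PySem.List.pyRange_zero_natCast]

theorem loopA_eq_altLoop (fuel : Nat) : ∀ (m fuel' : Nat) (edges : List (List Int)),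
    edges.length ≤ fuel → edges.length ≤ fuel' → edges.length ≤ m →
    loopA m fuel edges = altLoop fuel' edges := by
  induction fuel with
  | zero =>
    intro m fuel' edges hn _ _
    have : edges = [] := List.length_eq_zero_iff.mp (Nat.le_zero.mp hn)
    subst this
    cases fuel' <;> rfl
  | succ fuel ih =>
    intro m fuel' edges hn hn' hm
    cases edges with
    | nil => cases fuel' <;> rfl
    | cons e rest =>
      have hlr : rest.length + 1 ≤ fuel + 1 := by simpa using hn
      have hlm : rest.length + 1 ≤ m := by simpa using hm
      obtain ⟨fuel'', rfl⟩ : ∃ k, fuel' = k + 1 := by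
        cases fuel' with
        | zero => simp at hn'
        | succ k => exact ⟨k, rfl⟩
      have hlr' : rest.length + 1 ≤ fuel'' + 1 := by simpa using hn'
      rw [loopA, altLoop]
      rw [List.foldl_const, length_pyRange_zero]
      have hinit : ([PySem.List.pyGetD e 0 0, PySem.List.pyGetD e 1 0], rest)
          = (([PySem.List.pyGetD e 0 0] : List Int) ++
             ([PySem.List.pyGetD e 1 0] : List Int).reverse, rest) := by simp
      rw [hinit, iterate_stepA_eq_grow m (rest.length + 1) _ _ [] [] rest (by omega) (by omega)]
      have hrem := grow_rem_le (rest.length + 1) [PySem.List.pyGetD e 0 0]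
        [PySem.List.pyGetD e 1 0] rest
      show _ :: loopA m fuel (grow (rest.length + 1) [PySem.List.pyGetD e 0 0]
        [PySem.List.pyGetD e 1 0] rest).2.2 = _
      rw [ih m fuel'' _ (by omega) (by omega) (by omega)]

-- ---- proof-side: the Nat-indexed view of B's state ----

def pvE (vp : List (List Int)) (k : Nat) : List Int := vp.getD k []

def pvUget (used : List Bool) (k : Nat) : Bool := used.getD k false

def pvHit (vp : List (List Int)) (v : Int) (k : Nat) : Bool :=
  v == PySem.List.pyGetD (pvE vp k) 0 0 || v == PySem.List.pyGetD (pvE vp k) 1 0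

-- first index in L that is unused and incident to v
def findV (vp : List (List Int)) (v : Int) (used : List Bool) : List Nat → Option Nat
  | [] => none
  | k :: ks => if !pvUget used k && pvHit vp v k then some k else findV vp v used ks

-- first index in L that is unused and incident to h or t
def findHT (vp : List (List Int)) (h t : Int) (used : List Bool) : List Nat → Option Nat
  | [] => none
  | k :: ks => if !pvUget used k && (pvHit vp h k || pvHit vp t k) then some k
               else findHT vp h t used ks

-- the edges at the unused indices of L, in order
def pvRemN (vp : List (List Int)) (used : List Bool) (ks : List Nat) : List (List Int) :=
  (ks.filter (fun k => !pvUget used k)).map (pvE vp)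

-- how findEdge extends the chain at the edge with index k
def pvPayload (vp : List (List Int)) (h t : Int) (k : Nat) : Bool × Int :=
  if h == PySem.List.pyGetD (pvE vp k) 0 0 then (true, PySem.List.pyGetD (pvE vp k) 1 0)
  else if h == PySem.List.pyGetD (pvE vp k) 1 0 then (true, PySem.List.pyGetD (pvE vp k) 0 0)
  else if t == PySem.List.pyGetD (pvE vp k) 0 0 then (false, PySem.List.pyGetD (pvE vp k) 1 0)
  else (false, PySem.List.pyGetD (pvE vp k) 0 0)

theorem pvUget_set_ne (used : List Bool) (a b : Nat) (h : a ≠ b) :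
    pvUget (used.set a true) b = pvUget used b := by
  simp [pvUget, List.getD, List.getElem?_set_ne h]

theorem pvUget_set_true (used : List Bool) (a b : Nat) (h : pvUget used b = true) :
    pvUget (used.set a true) b = true := by
  by_cases hab : a = b
  · subst hab
    by_cases hl : a < used.length
    · simp [pvUget, List.getD, List.getElem?_set_self hl]
    · rw [List.set_eq_of_length_le (by omega)]; exact h
  · rw [pvUget_set_ne used a b hab]; exact h

theorem pvUget_set_self (used : List Bool) (a : Nat) (h : a < used.length) :
    pvUget (used.set a true) a = true := by
  simp [pvUget, List.getD, List.getElem?_set_self h]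

theorem pvRemN_set_not_mem (vp : List (List Int)) (used : List Bool) (a : Nat)
    (ks : List Nat) (h : a ∉ ks) :
    pvRemN vp (used.set a true) ks = pvRemN vp used ks := by
  unfold pvRemN
  congr 1
  apply List.filter_congr
  intro k hk
  rw [pvUget_set_ne used a k (fun he => h (he ▸ hk))]

-- ---- buildInc computes, for each vertex, the ascending incident-edge-index list ----

def pvPairsAt (vp : List (List Int)) (k : Nat) : List (Int × Int) :=
  [(PySem.List.pyGetD (pvE vp k) 0 0, (k : Int)),
   (PySem.List.pyGetD (pvE vp k) 1 0, (k : Int))]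

def pvPairs (vp : List (List Int)) : List (Int × Int) :=
  (List.range vp.length).flatMap (pvPairsAt vp)

theorem buildInc_getD (vp : List (List Int)) (v : Int) :
    (buildInc vp).getD v [] =
      ((pvPairs vp).filter (fun p => p.1 == v)).map (fun p => p.2) := by
  unfold buildInc pvPairs pvPairsAt
  rw [PySem.List.pyRange_zero_natCast, List.foldl_map]
  have hfun : (fun (x : PySem.Dict Int (List Int)) (y : Nat) =>
      (fun (d : PySem.Dict Int (List Int)) (k : Int) =>
        let e := PySem.List.pyGetD vp k []
        [PySem.List.pyGetD e 0 0, PySem.List.pyGetD e 1 0].foldl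
          (fun d v => d.modify v [] (· ++ [k])) d) x (↑y : Int))
      = (fun (acc : PySem.Dict Int (List Int)) (k : Nat) =>
          List.foldl (fun (d : PySem.Dict Int (List Int)) (p : Int × Int) =>
              d.modify p.1 [] (· ++ [p.2])) acc
            [(PySem.List.pyGetD (pvE vp k) 0 0, ((k : Nat) : Int)),
             (PySem.List.pyGetD (pvE vp k) 1 0, ((k : Nat) : Int))]) := by
    funext x y
    simp [PySem.List.pyGetD_natCast, pvE, List.foldl]
  rw [hfun, ← List.foldl_flatMap]
  rw [PySem.Dict.getD_foldl_modify_append, PySem.Dict.getD_empty]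
  simp

-- ---- firstUnused over the dict = findV over all indices ----

theorem firstUnusedIn_append (used : List Bool) (xs ys : List Int) :
    firstUnusedIn used (xs ++ ys) =
      match firstUnusedIn used xs with
      | some r => some r
      | none => firstUnusedIn used ys := by
  induction xs with
  | nil => simp [firstUnusedIn]
  | cons a xs ih =>
    simp only [List.cons_append, firstUnusedIn]
    split_ifs with h
    · exact ih
    · rfl

theorem firstUnusedIn_at (vp : List (List Int)) (v : Int) (used : List Bool) (a : Nat) :
    firstUnusedIn used (((pvPairsAt vp a).filter (fun p => p.1 == v)).map (fun p => p.2)) =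
      if !pvUget used a && pvHit vp v a then some (Int.ofNat a) else none := by
  have h0 : (PySem.List.pyGetD (pvE vp a) 0 0 == v) = (v == PySem.List.pyGetD (pvE vp a) 0 0) :=
    Bool.beq_comm
  have h1 : (PySem.List.pyGetD (pvE vp a) 1 0 == v) = (v == PySem.List.pyGetD (pvE vp a) 1 0) :=
    Bool.beq_comm
  simp only [pvPairsAt, List.filter, h0, h1]
  cases hv0 : (v == PySem.List.pyGetD (pvE vp a) 0 0) <;>
  cases hv1 : (v == PySem.List.pyGetD (pvE vp a) 1 0) <;>
  cases hu : pvUget used a <;>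
    simp_all [firstUnusedIn, pvHit, pvUget, PySem.List.pyGetD_natCast]

theorem firstUnusedIn_flatMap (vp : List (List Int)) (v : Int) (used : List Bool)
    (L : List Nat) :
    firstUnusedIn used ((L.flatMap (fun k =>
        (pvPairsAt vp k).filter (fun p => p.1 == v))).map (fun p => p.2)) =
      (findV vp v used L).map Int.ofNat := by
  induction L with
  | nil => simp [firstUnusedIn, findV]
  | cons a L ih =>
    rw [List.flatMap_cons, List.map_append, firstUnusedIn_append, ih, firstUnusedIn_at]
    simp only [findV]
    cases hc : (!pvUget used a && pvHit vp v a) <;> simp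


theorem firstUnused_eq_findV (vp : List (List Int)) (used : List Bool) (v : Int) :
    firstUnused (buildInc vp) used v =
      (findV vp v used (List.range vp.length)).map Int.ofNat := by
  unfold firstUnused
  rw [buildInc_getD, show pvPairs vp = (List.range vp.length).flatMap (pvPairsAt vp) from rfl,
    List.filter_flatMap, firstUnusedIn_flatMap]

-- ---- the selection block = first unused incident index, on a sorted index list ----

theorem findV_mem (vp : List (List Int)) (v : Int) (used : List Bool) (L : List Nat)
    (k : Nat) (h : findV vp v used L = some k) : k ∈ L := by
  induction L with
  | nil => simp [findV] at h
  | cons a L ih =>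
    unfold findV at h
    split_ifs at h
    · cases h; exact List.mem_cons_self
    · exact List.mem_cons_of_mem a (ih h)

theorem select_eq_findHT (vp : List (List Int)) (h t : Int) (used : List Bool)
    (L : List Nat) (hs : L.Pairwise (· < ·)) :
    (match findV vp h used L, findV vp t used L with
      | none, none => none
      | some kh, none => some kh
      | none, some kt => some kt
      | some kh, some kt => some (if kh ≤ kt then kh else kt)) =
      findHT vp h t used L := by
  induction L with
  | nil => simp [findV, findHT]
  | cons a L ih =>
    have ihh := ih (List.pairwise_cons.mp hs).2
    simp only [findV, findHT]
    cases hu : pvUget used a <;>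
    cases hh : pvHit vp h a <;>
    cases ht : pvHit vp t a <;>
      simp only [Bool.not_true, Bool.not_false, Bool.false_and, Bool.true_and,
        Bool.or_true, Bool.true_or, Bool.false_or, Bool.or_false, if_true, if_false,
        ite_true, ite_false, Bool.false_eq_true, reduceIte]
    · exact ihh
    · -- unused, ¬hitH, hitT
      cases hfh : findV vp h used L with
      | none => rfl
      | some c =>
        have hc : a < c := List.rel_of_pairwise_cons hs (findV_mem _ _ _ _ _ hfh)
        simp [show ¬(c ≤ a) from by omega]
    · -- unused, hitH, ¬hitT
      cases hft : findV vp t used L with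
      | none => rfl
      | some b =>
        have hb : a < b := List.rel_of_pairwise_cons hs (findV_mem _ _ _ _ _ hft)
        simp [show a ≤ b from by omega]
    · simp
    · exact ihh
    · exact ihh
    · exact ihh
    · exact ihh

-- ---- findEdge over the remaining edges = findHT over the indices ----

-- findHT's result is unused, in L
theorem findHT_mem (vp : List (List Int)) (h t : Int) (used : List Bool) (L : List Nat)
    (k : Nat) (hf : findHT vp h t used L = some k) : k ∈ L ∧ pvUget used k = false := by
  induction L with
  | nil => simp [findHT] at hf
  | cons a L ih
  => unfold findHT at hf
     split_ifs at hf with hc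
     · cases hf
       refine ⟨List.mem_cons_self, ?_⟩
       rcases Bool.and_eq_true_iff.mp hc with ⟨h1, _⟩
       simpa using h1
     · obtain ⟨h1, h2⟩ := ih hf
       exact ⟨List.mem_cons_of_mem a h1, h2⟩


theorem findEdge_pvRemN (vp : List (List Int)) (h t : Int) (used : List Bool)
    (L : List Nat) (hnd : L.Nodup) (hb : ∀ k ∈ L, k < used.length) :
    findEdge h t (pvRemN vp used L) =
      match findHT vp h t used L with
      | none => none
      | some k => some (pvPayload vp h t k, pvRemN vp (used.set k true) L) := by
  induction L with
  | nil => simp [pvRemN, findEdge, findHT]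
  | cons a L ih =>
    have hanotin : a ∉ L := (List.nodup_cons.mp hnd).1
    have ihh := ih (List.nodup_cons.mp hnd).2 (fun k hk => hb k (List.mem_cons_of_mem a hk))
    cases hu : pvUget used a with
    | true =>
      have hrem : pvRemN vp used (a :: L) = pvRemN vp used L := by
        simp [pvRemN, List.filter_cons, hu]
      rw [hrem, ihh]
      simp only [findHT, hu, Bool.not_true, Bool.false_and, Bool.false_eq_true, if_false,
        reduceIte]
      cases hf : findHT vp h t used L with
      | none => rfl
      | some k =>
        have hk := (findHT_mem vp h t used L k hf).1
        have hka : k ≠ a := fun he => hanotin (he ▸ hk)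
        simp only []
        congr 1
        congr 1
        show pvRemN vp (used.set k true) L = pvRemN vp (used.set k true) (a :: L)
        simp [pvRemN, List.filter_cons, pvUget_set_ne used k a hka, hu]
    | false =>
      have hrem : pvRemN vp used (a :: L) = pvE vp a :: pvRemN vp used L := by
        simp [pvRemN, List.filter_cons, hu]
      rw [hrem]
      cases hhit : (pvHit vp h a || pvHit vp t a) with
      | true =>
        have hsome : findHT vp h t used (a :: L) = some a := by
          simp [findHT, hu, hhit]
        rw [hsome]
        have hremset : pvRemN vp (used.set a true) (a :: L) = pvRemN vp used L := by
          rw [show pvRemN vp (used.set a true) (a :: L)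
              = pvRemN vp (used.set a true) L from by
            simp [pvRemN, List.filter_cons, pvUget_set_self used a (hb a List.mem_cons_self)]]
          exact pvRemN_set_not_mem vp used a L hanotin
        unfold findEdge pvPayload
        rcases Bool.or_eq_true_iff.mp hhit with hH | hT
        · rcases Bool.or_eq_true_iff.mp hH with h0 | h1
          · simp [h0, hremset]
          · by_cases h0 : (h == PySem.List.pyGetD (pvE vp a) 0 0) = true <;>
              simp [h0, h1, hremset]
        · rcases Bool.or_eq_true_iff.mp hT with t0 | t1
          · by_cases h0 : (h == PySem.List.pyGetD (pvE vp a) 0 0) = true <;>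
            by_cases h1 : (h == PySem.List.pyGetD (pvE vp a) 1 0) = true <;>
              simp [h0, h1, t0, hremset]
          · by_cases h0 : (h == PySem.List.pyGetD (pvE vp a) 0 0) = true <;>
            by_cases h1 : (h == PySem.List.pyGetD (pvE vp a) 1 0) = true <;>
            by_cases t0 : (t == PySem.List.pyGetD (pvE vp a) 0 0) = true <;>
              simp [h0, h1, t0, t1, hremset]
      | false =>
        have hnone : findHT vp h t used (a :: L) = findHT vp h t used L := by
          simp [findHT, hu, hhit]
        rw [hnone]
        have h0 : (h == PySem.List.pyGetD (pvE vp a) 0 0) = false := by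
          revert hhit; simp [pvHit]; try tauto
        have h1 : (h == PySem.List.pyGetD (pvE vp a) 1 0) = false := by
          revert hhit; simp [pvHit]; try tauto
        have t0 : (t == PySem.List.pyGetD (pvE vp a) 0 0) = false := by
          revert hhit; simp [pvHit]; try tauto
        have t1 : (t == PySem.List.pyGetD (pvE vp a) 1 0) = false := by
          revert hhit; simp [pvHit]; try tauto
        unfold findEdge
        rw [ihh]
        cases hf : findHT vp h t used L with
        | none => simp [h0, h1, t0, t1]
        | some k =>
          have hk := (findHT_mem vp h t used L k hf).1
          have hka : k ≠ a := fun he => hanotin (he ▸ hk)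
          have hcons : pvRemN vp (used.set k true) (a :: L)
              = pvE vp a :: pvRemN vp (used.set k true) L := by
            simp [pvRemN, List.filter_cons, pvUget_set_ne used k a hka, hu]
          simp [h0, h1, t0, t1, hcons]

-- ---- grow on edge lists = growB on used flags ----

theorem selectK_eq (vp : List (List Int)) (used : List Bool) (h t : Int) :
    selectK (buildInc vp) used h t =
      (findHT vp h t used (List.range vp.length)).map Int.ofNat := by
  unfold selectK
  rw [firstUnused_eq_findV, firstUnused_eq_findV,
    ← select_eq_findHT vp h t used _ List.pairwise_lt_range]
  cases findV vp h used (List.range vp.length) <;>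
  cases findV vp t used (List.range vp.length) <;>
    simp [apply_ite Int.ofNat]

theorem remN_pos_of_findHT (vp : List (List Int)) (h t : Int) (used : List Bool)
    (L : List Nat) (k : Nat) (hf : findHT vp h t used L = some k) :
    1 ≤ (pvRemN vp used L).length := by
  obtain ⟨hk, hku⟩ := findHT_mem vp h t used L k hf
  have hmem : k ∈ L.filter (fun k => !pvUget used k) :=
    List.mem_filter.mpr ⟨hk, by simp [hku]⟩
  have := List.length_pos_of_mem hmem
  simp [pvRemN]
  omega

theorem grow_eq_growB (vp : List (List Int)) :
    ∀ (fuelA fuelB : Nat) (f0 b0 : Int) (fr br : List Int) (used : List Bool),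
    used.length = vp.length →
    (pvRemN vp used (List.range vp.length)).length ≤ fuelA →
    (pvRemN vp used (List.range vp.length)).length ≤ fuelB →
    grow fuelA (f0 :: fr) (b0 :: br) (pvRemN vp used (List.range vp.length)) =
      ((growB vp (buildInc vp) fuelB (f0 :: fr) (b0 :: br) used).1,
       (growB vp (buildInc vp) fuelB (f0 :: fr) (b0 :: br) used).2.1,
       pvRemN vp (growB vp (buildInc vp) fuelB (f0 :: fr) (b0 :: br) used).2.2
         (List.range vp.length)) ∧
      (growB vp (buildInc vp) fuelB (f0 :: fr) (b0 :: br) used).2.2.length = vp.length := by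
  intro fuelA
  induction fuelA with
  | zero =>
    intro fuelB f0 b0 fr br used hlen hA hB
    cases hf : findHT vp f0 b0 used (List.range vp.length) with
    | some k => exact absurd (remN_pos_of_findHT vp f0 b0 used _ k hf) (by omega)
    | none =>
      have hGB : growB vp (buildInc vp) fuelB (f0 :: fr) (b0 :: br) used
          = (f0 :: fr, b0 :: br, used) := by
        cases fuelB with
        | zero => rfl
        | succ n => simp [growB, selectK_eq, hf]
      rw [hGB]
      exact ⟨by simp [grow], hlen⟩
  | succ nA ih =>
    intro fuelB f0 b0 fr br used hlen hA hB
    have hFE := findEdge_pvRemN vp f0 b0 used (List.range vp.length) List.nodup_range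
      (fun k hk => by rw [hlen]; exact List.mem_range.mp hk)
    cases hf : findHT vp f0 b0 used (List.range vp.length) with
    | none =>
      have hED : findEdge f0 b0 (pvRemN vp used (List.range vp.length)) = none := by
        rw [hFE, hf]
      have hGB : growB vp (buildInc vp) fuelB (f0 :: fr) (b0 :: br) used
          = (f0 :: fr, b0 :: br, used) := by
        cases fuelB with
        | zero => rfl
        | succ n => simp [growB, selectK_eq, hf]
      rw [hGB]
      refine ⟨?_, hlen⟩
      simp only [grow, List.headD_cons, hED]
    | some k =>
      have hpos := remN_pos_of_findHT vp f0 b0 used _ k hf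
      obtain ⟨nB, rfl⟩ : ∃ n, fuelB = n + 1 := by
        cases fuelB with
        | zero => omega
        | succ n => exact ⟨n, rfl⟩
      have hED : findEdge f0 b0 (pvRemN vp used (List.range vp.length))
          = some (pvPayload vp f0 b0 k,
              pvRemN vp (used.set k true) (List.range vp.length)) := by
        rw [hFE, hf]
      have hlen1 := findEdge_some_length _ _ _ _ _ hED
      have hE : PySem.List.pyGetD vp ((k : Nat) : Int) [] = pvE vp k := by
        simp [pvE, PySem.List.pyGetD_natCast]
      have hT : (((k : Nat) : Int)).toNat = k := Int.toNat_natCast k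
      have hlen' : (used.set k true).length = vp.length := by simp [hlen]
      have hstepA : grow (nA + 1) (f0 :: fr) (b0 :: br)
            (pvRemN vp used (List.range vp.length))
          = (if (pvPayload vp f0 b0 k).1 then
              grow nA ((pvPayload vp f0 b0 k).2 :: f0 :: fr) (b0 :: br)
                (pvRemN vp (used.set k true) (List.range vp.length))
             else
              grow nA (f0 :: fr) ((pvPayload vp f0 b0 k).2 :: b0 :: br)
                (pvRemN vp (used.set k true) (List.range vp.length))) := by
        simp only [grow, List.headD_cons, hED]
      have hstepB : growB vp (buildInc vp) (nB + 1) (f0 :: fr) (b0 :: br) used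
          = (if (pvPayload vp f0 b0 k).1 then
              growB vp (buildInc vp) nB ((pvPayload vp f0 b0 k).2 :: f0 :: fr) (b0 :: br)
                (used.set k true)
             else
              growB vp (buildInc vp) nB (f0 :: fr) ((pvPayload vp f0 b0 k).2 :: b0 :: br)
                (used.set k true)) := by
        simp only [growB, List.headD_cons, selectK_eq, hf, Option.map_some]
        simp only [hE, hT, pvPayload, pvE, List.getD]
        split_ifs <;> simp_all
      rw [hstepA, hstepB]
      cases hside : (pvPayload vp f0 b0 k).1 with
      | true =>
        simp only [if_true, reduceIte]
        exact ih nB _ _ _ _ _ hlen' (by omega) (by omega)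
      | false =>
        simp only [if_false, Bool.false_eq_true, reduceIte]
        exact ih nB _ _ _ _ _ hlen' (by omega) (by omega)


-- growB only ever sets flags
theorem growB_mono (vp : List (List Int)) (inc : PySem.Dict Int (List Int)) :
    ∀ (fuel : Nat) (front back : List Int) (used : List Bool) (j : Nat),
    pvUget used j = true → pvUget (growB vp inc fuel front back used).2.2 j = true := by
  intro fuel
  induction fuel with
  | zero => intro f b u j h; simpa [growB] using h
  | succ fuel ih =>
    intro f b u j h
    unfold growB
    cases hsel : selectK inc u (f.headD 0) (b.headD 0) with
    | none => simpa using h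
    | some k =>
      simp only
      split_ifs <;> exact ih _ _ _ _ (pvUget_set_true u _ _ h)

-- the head of the remaining edges is the edge at the first unused index
theorem pvRemN_cons_of_min (vp : List (List Int)) (used : List Bool) (k : Nat) :
    ∀ (L : List Nat), L.Pairwise (· < ·) → k ∈ L → pvUget used k = false →
    k < used.length →
    (∀ j ∈ L, j < k → pvUget used j = true) →
    pvRemN vp used L = pvE vp k :: pvRemN vp (used.set k true) L := by
  intro L
  induction L with
  | nil => intro _ hk; simp at hk
  | cons a L ih =>
    intro hp hk hku hkl hmin
    rcases List.mem_cons.mp hk with rfl | hkL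
    · have hnotmem : k ∉ L := fun hm => absurd (List.rel_of_pairwise_cons hp hm) (lt_irrefl k)
      have h2 := pvRemN_set_not_mem vp used k L hnotmem
      unfold pvRemN at h2 ⊢
      simp only [List.filter_cons, hku, pvUget_set_self used k hkl, Bool.not_false, Bool.not_true,
        if_true, if_false, List.map_cons, ite_true, ite_false]
      simp [h2]
    · have hak : a < k := List.rel_of_pairwise_cons hp hkL
      have ha : pvUget used a = true := hmin a List.mem_cons_self hak
      have ha' : pvUget (used.set k true) a = true := pvUget_set_true used k a ha
      unfold pvRemN
      simp only [List.filter_cons, ha, ha', Bool.not_true, if_false, ite_false]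
      exact ih (List.pairwise_cons.mp hp).2 hkL hku hkl
        (fun j hj hlt => hmin j (List.mem_cons_of_mem a hj) hlt)

-- ---- the seed loop ----

theorem pvRemN_len_le (vp : List (List Int)) (used : List Bool) :
    (pvRemN vp used (List.range vp.length)).length ≤ vp.length := by
  simp only [pvRemN, List.length_map]
  calc (List.filter (fun k => !pvUget used k) (List.range vp.length)).length
      ≤ (List.range vp.length).length := List.length_filter_le _ _
    _ = vp.length := List.length_range

theorem seedLoop_eq (vp : List (List Int)) :
    ∀ (L : List Nat) (fuelA : Nat) (used : List Bool),
    used.length = vp.length →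
    L.Pairwise (· < ·) →
    (∀ k ∈ L, k < vp.length) →
    (∀ k, k < vp.length → pvUget used k = false → k ∈ L) →
    (pvRemN vp used (List.range vp.length)).length ≤ fuelA →
    altLoop fuelA (pvRemN vp used (List.range vp.length)) =
      seedLoopB vp (buildInc vp) (L.map Int.ofNat) used := by
  intro L
  induction L with
  | nil =>
    intro fuelA used hlen hp hbound hcover hfuel
    have hrem : pvRemN vp used (List.range vp.length) = [] := by
      simp only [pvRemN, List.map_eq_nil_iff]
      rw [List.filter_eq_nil_iff]
      intro k hk
      by_cases h : pvUget used k = true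
      · simp [h]
      · exact absurd (hcover k (List.mem_range.mp hk) (by simpa using h)) (by simp)
    rw [hrem]
    cases fuelA <;> rfl
  | cons a L ih =>
    intro fuelA used hlen hp hbound hcover hfuel
    cases hu : pvUget used a with
    | true =>
      have hseed : seedLoopB vp (buildInc vp) ((a :: L).map Int.ofNat) used
          = seedLoopB vp (buildInc vp) (L.map Int.ofNat) used := by
        simp only [List.map_cons, seedLoopB, Int.ofNat_eq_natCast, PySem.List.pyGetD_natCast]
        rw [if_pos (by exact hu)]
      rw [hseed]
      exact ih fuelA used hlen (List.pairwise_cons.mp hp).2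
        (fun k hk => hbound k (List.mem_cons_of_mem a hk))
        (fun k hk hk' => by
          rcases List.mem_cons.mp (hcover k hk hk') with rfl | h
          · rw [hu] at hk'; cases hk'
          · exact h)
        hfuel
    | false =>
      have ha_lt : a < vp.length := hbound a List.mem_cons_self
      have hmin : ∀ j ∈ List.range vp.length, j < a → pvUget used j = true := by
        intro j hj hja
        by_contra hj'
        have hjmem : j ∈ a :: L :=
          hcover j (List.mem_range.mp hj) (by simpa using hj')
        rcases List.mem_cons.mp hjmem with rfl | hjL
        · omega
        · exact absurd (List.rel_of_pairwise_cons hp hjL) (by omega)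
      have hcons := pvRemN_cons_of_min vp used a (List.range vp.length)
        List.pairwise_lt_range (List.mem_range.mpr ha_lt) hu
        (by rw [hlen]; exact ha_lt) hmin
      rw [hcons] at hfuel ⊢
      obtain ⟨fA, rfl⟩ : ∃ n, fuelA = n + 1 := by
        cases fuelA with
        | zero => simp at hfuel
        | succ n => exact ⟨n, rfl⟩
      have hE : PySem.List.pyGetD vp ((a : Nat) : Int) [] = pvE vp a := by
        simp [pvE, PySem.List.pyGetD_natCast]
      have hused1len : (used.set a true).length = vp.length := by simp [hlen]
      obtain ⟨hgeq, hglen⟩ := grow_eq_growB vp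
        ((pvRemN vp (used.set a true) (List.range vp.length)).length + 1) vp.length
        (PySem.List.pyGetD (pvE vp a) 0 0) (PySem.List.pyGetD (pvE vp a) 1 0) [] []
        (used.set a true) hused1len (by omega) (pvRemN_len_le vp _)
      have hstepA : altLoop (fA + 1)
            (pvE vp a :: pvRemN vp (used.set a true) (List.range vp.length))
          = ((grow ((pvRemN vp (used.set a true) (List.range vp.length)).length + 1)
                [PySem.List.pyGetD (pvE vp a) 0 0] [PySem.List.pyGetD (pvE vp a) 1 0]
                (pvRemN vp (used.set a true) (List.range vp.length))).1 ++
              (grow ((pvRemN vp (used.set a true) (List.range vp.length)).length + 1)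
                [PySem.List.pyGetD (pvE vp a) 0 0] [PySem.List.pyGetD (pvE vp a) 1 0]
                (pvRemN vp (used.set a true) (List.range vp.length))).2.1.reverse) ::
            altLoop fA (grow ((pvRemN vp (used.set a true) (List.range vp.length)).length + 1)
                [PySem.List.pyGetD (pvE vp a) 0 0] [PySem.List.pyGetD (pvE vp a) 1 0]
                (pvRemN vp (used.set a true) (List.range vp.length))).2.2 := rfl
      have hstepB : seedLoopB vp (buildInc vp) ((a :: L).map Int.ofNat) used
          = ((growB vp (buildInc vp) vp.length [PySem.List.pyGetD (pvE vp a) 0 0]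
                [PySem.List.pyGetD (pvE vp a) 1 0] (used.set a true)).1 ++
              (growB vp (buildInc vp) vp.length [PySem.List.pyGetD (pvE vp a) 0 0]
                [PySem.List.pyGetD (pvE vp a) 1 0] (used.set a true)).2.1.reverse) ::
            seedLoopB vp (buildInc vp) (L.map Int.ofNat)
              (growB vp (buildInc vp) vp.length [PySem.List.pyGetD (pvE vp a) 0 0]
                [PySem.List.pyGetD (pvE vp a) 1 0] (used.set a true)).2.2 := by
        simp only [List.map_cons, seedLoopB, Int.ofNat_eq_natCast, PySem.List.pyGetD_natCast]
        rw [if_neg (by rw [show (used.getD a false : Bool) = false from hu]; simp)]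
        simp [hE, Int.toNat_natCast, pvE]
      rw [hstepA, hstepB, hgeq]
      have hrest := grow_rem_le ((pvRemN vp (used.set a true) (List.range vp.length)).length + 1)
        [PySem.List.pyGetD (pvE vp a) 0 0] [PySem.List.pyGetD (pvE vp a) 1 0]
        (pvRemN vp (used.set a true) (List.range vp.length))
      rw [hgeq] at hrest
      congr 1
      apply ih fA _ hglen (List.pairwise_cons.mp hp).2
        (fun k hk => hbound k (List.mem_cons_of_mem a hk))
        ?_ (by simpa using le_trans hrest (by simpa using hfuel))
      intro k hk hk'
      have hk1 : pvUget (used.set a true) k = false := by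
        by_contra hh
        have := growB_mono vp (buildInc vp) vp.length
          [PySem.List.pyGetD (pvE vp a) 0 0] [PySem.List.pyGetD (pvE vp a) 1 0]
          (used.set a true) k (by simpa using hh)
        rw [hk'] at this; cases this
      have hka : k ≠ a := by
        intro he
        rw [he, pvUget_set_self used a (by rw [hlen]; exact ha_lt)] at hk1
        cases hk1
      have hk0 : pvUget used k = false := by
        rw [← pvUget_set_ne used a k (fun he => hka he.symm)]
        exact hk1
      rcases List.mem_cons.mp (hcover k hk hk0) with rfl | h
      · exact absurd rfl hka
      · exact h

theorem pvRemN_replicate (vp : List (List Int)) :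
    pvRemN vp (List.replicate vp.length false) (List.range vp.length) = vp := by
  have h1 : ∀ k, pvUget (List.replicate vp.length false) k = false := by
    intro k
    simp only [pvUget, List.getD, List.getElem?_replicate]
    by_cases h : k < vp.length <;> simp [h]
  unfold pvRemN
  rw [List.filter_eq_self.mpr (by intro k _; simp [h1 k])]
  apply List.ext_getElem (by simp)
  intro i h1 h2
  simp [pvE, List.getD]
  rw [List.getElem?_eq_getElem h2]
  rfl

-- ===== VERDICT (by name: the statement is the Claim_ definition above) =====
theorem vertloops_spec : Claim_equal_vertloops := by
  intro vp _ _
  unfold Spec_vertloops vertloops vertloops_alt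
  rw [loopA_eq_altLoop vp.length vp.length vp.length vp (le_refl _) (le_refl _) (le_refl _)]
  have h := seedLoop_eq vp (List.range vp.length) vp.length (List.replicate vp.length false)
    (by simp) List.pairwise_lt_range (by simp) (by intro k hk _; simpa using hk)
    (by rw [pvRemN_replicate])
  rw [pvRemN_replicate] at h
  rw [PySem.List.pyRange_zero_natCast]
  exact h
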